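-- pv_equiv track=rewrite | github.com/Airyshtoteles/learnLeetCode | Day33/Part2/k_alternating_subsequence_xor.py | k_alternating_max_xor
-- ===== SOURCE A (Python) =====
-- from typing import List
--
-- BITS = 31  # for up to 1e9 < 2^30
--
-- def insert_basis(basis: List[int], x: int) -> None:
--     for i in reversed(range(BITS)):
--         if not (x >> i) & 1:
--             continue
--         if basis[i] == 0:
--             basis[i] = x
--             return
--         x ^= basis[i]
--
-- def merge_basis(dst: List[int], src: List[int]) -> None:
--     for v in src:
--         if v:
--             insert_basis(dst, v)
--
-- def max_xor(basis: List[int]) -> int: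
--     res = 0
--     for i in reversed(range(BITS)):
--         if basis[i] and (res ^ basis[i]) > res:
--             res ^= basis[i]
--     return res
--
-- def k_alternating_max_xor(nums: List[int], k: int) -> int:
--     n = len(nums)
--     # Store bases B[i]; each basis is length BITS
--     B = [ [0]*BITS for _ in range(n+ k + 1) ]  # extra padding to avoid bounds
--     for i in range(n-1, -1, -1):
--         # Start from B[i+1] (skip i case)
--         cur = B[i][:]
--         merge_basis(cur, B[i+1])
--         # Include choosing i then jump to i+k
--         choose_basis = B[i+k][:]
--         insert_basis(choose_basis, nums[i])
--         merge_basis(cur, choose_basis)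
--         B[i] = cur
--     return max_xor(B[0])
-- ===== SOURCE B (Python) =====
-- from typing import List
--
-- BITS = 31  # for up to 1e9 < 2^30
-- _MASK = (1 << BITS) - 1
--
--
-- def k_alternating_max_xor(nums: List[int], k: int) -> int:
--     # Every single element is a valid k-alternating subsequence, so the per-index
--     # basis DP is unnecessary: one linear basis accumulated over all of nums
--     # (in the same right-to-left insertion order) yields the same answer.
--     basis = {}  # pivot bit -> stored vector whose top tracked bit is the pivot
--     for x in reversed(nums):
--         while x & _MASK:
--             p = (x & _MASK).bit_length() - 1
--             if p in basis:
--                 x ^= basis[p]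
--             else:
--                 basis[p] = x
--                 break
--     res = 0
--     for p in sorted(basis, reverse=True):
--         res = max(res, res ^ basis[p])
--     return res
-- ===== Notes on version B (the rewrite author's own statement) =====
-- stated objective: faster
-- what changed: B drops A's whole per-index basis DP (n+k+1 basis arrays with a full copy/merge of 31-slot bases at every position): since every single element is a valid k-alternating subsequence, one linear basis suffices; B accumulates it in a single pass into a pivot->vector dict, reducing each element by a while-loop on its current top bit, and takes the greedy maximum over the pivots in descending sorted order.
-- crash fix: For every k < 0 A raises IndexError (the DP table has n+k+1 rows but row n is read, resp. row 0 of an empty table), while B, which never needs k, returns the basis maximum. — e.g. on k_alternating_max_xor([5], -1): A raises IndexError, B returns 5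
import Mathlib
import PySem

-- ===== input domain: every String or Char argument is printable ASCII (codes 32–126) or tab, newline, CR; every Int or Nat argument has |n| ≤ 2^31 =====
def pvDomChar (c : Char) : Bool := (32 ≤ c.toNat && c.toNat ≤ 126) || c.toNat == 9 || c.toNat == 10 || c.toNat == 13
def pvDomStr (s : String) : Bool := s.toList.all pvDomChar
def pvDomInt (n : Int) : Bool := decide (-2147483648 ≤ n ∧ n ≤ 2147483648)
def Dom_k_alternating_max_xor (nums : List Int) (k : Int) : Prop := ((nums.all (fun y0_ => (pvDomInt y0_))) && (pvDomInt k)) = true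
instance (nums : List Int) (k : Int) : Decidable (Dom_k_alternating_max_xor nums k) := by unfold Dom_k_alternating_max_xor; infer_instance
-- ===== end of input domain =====

-- B drops the per-index basis DP: every single element is a k-alternating subsequence, so one
-- linear basis accumulated in a single pass (pivot -> vector dict, greedy max over sorted pivots)
-- gives the same answer. Equivalence of the RETURN value is proved for k ≥ 0 (A raises for k < 0).

-- ===== PORT A =====
-- BITS = 31; a basis is a list of 31 ints, slot i holding a vector whose top tracked bit is i.
def pvZeros : List Int := List.replicate 31 0

-- insert_basis: for i in reversed(range(31)): skip clear bits; place at empty slot; else x ^= basis[i]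
def pvInsertAux (basis : List Int) (x : Int) : Nat → List Int
  | 0 => basis
  | i+1 =>
    if PySem.Int.band (x >>> i) 1 = 0 then pvInsertAux basis x i
    else if basis.getD i 0 = 0 then basis.set i x
    else pvInsertAux basis (PySem.Int.bxor x (basis.getD i 0)) i

def pvInsert (basis : List Int) (x : Int) : List Int := pvInsertAux basis x 31

-- merge_basis: for v in src: if v: insert_basis(dst, v)
def pvMerge (dst src : List Int) : List Int :=
  src.foldl (fun d v => if v ≠ 0 then pvInsert d v else d) dst

-- max_xor: res = 0; for i in reversed(range(31)): if basis[i] and (res ^ basis[i]) > res: res ^= basis[i]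
def pvMaxXorAux (basis : List Int) (res : Int) : Nat → Int
  | 0 => res
  | i+1 =>
    if basis.getD i 0 ≠ 0 ∧ res < PySem.Int.bxor res (basis.getD i 0) then
      pvMaxXorAux basis (PySem.Int.bxor res (basis.getD i 0)) i
    else pvMaxXorAux basis res i

def pvMaxXor (basis : List Int) : Int := pvMaxXorAux basis 0 31

-- loop body of 'for i in range(n-1, -1, -1)' (i + k.toNat is i + k: Pre_ gives k ≥ 0)
def pvStepA (nums : List Int) (k : Int) (B : List (List Int)) (i : Nat) : List (List Int) :=
  let cur := pvMerge (B.getD i []) (B.getD (i+1) [])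
  let choose := pvInsert (B.getD (i + k.toNat) []) (nums.getD i 0)
  B.set i (pvMerge cur choose)

def k_alternating_max_xor (nums : List Int) (k : Int) : Int :=
  let n := nums.length
  let B := List.replicate ((n + k + 1 : Int).toNat) pvZeros
  let B := ((List.range n).reverse).foldl (pvStepA nums k) B
  pvMaxXor (B.getD 0 [])

-- ===== PORT B =====
-- _MASK = (1 << BITS) - 1
def pvMaskB : Int := 2147483647

-- (n).bit_length() for a nonnegative int, ported by hand (exact for n < 2^fuel; every value it
-- is applied to is masked to 31 bits, and it is called with fuel 32)
def pvBitLen : Nat → Nat → Nat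
  | 0, _ => 0
  | fuel+1, n => if n = 0 then 0 else pvBitLen fuel (n / 2) + 1

-- the while-loop of B: while x & _MASK: p = (x & _MASK).bit_length()-1; xor at an occupied pivot
-- else store and break.  Fuel recursion: the pivot strictly decreases, so fuel 32 never runs out.
def pvInsB (basis : PySem.Dict Int Int) (x : Int) : Nat → PySem.Dict Int Int
  | 0 => basis
  | fuel+1 =>
    let m := PySem.Int.band x pvMaskB
    if m = 0 then basis
    else
      let p : Int := Int.ofNat (pvBitLen 32 m.toNat - 1)
      match PySem.Dict.get? basis p with
      | some v => pvInsB basis (PySem.Int.bxor x v) fuel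
      | none => PySem.Dict.insert basis p x

def k_alternating_max_xor_alt (nums : List Int) (_k : Int) : Int :=
  let basis := nums.reverse.foldl (fun d x => pvInsB d x 32) PySem.Dict.empty
  (PySem.List.sorted (PySem.Dict.keys basis) (fun p => p) true).foldl
    (fun res p => max res (PySem.Int.bxor res (PySem.Dict.getD basis p 0))) 0

-- ===== PRECONDITION & SPEC =====
-- A raises IndexError for every k < 0 (the table has n+k+1 rows but rows up to index n are read).
def Pre_k_alternating_max_xor (nums : List Int) (k : Int) : Prop := 0 ≤ k
instance (nums : List Int) (k : Int) : Decidable (Pre_k_alternating_max_xor nums k) := by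
  unfold Pre_k_alternating_max_xor; infer_instance

def pvWitness_k_alternating_max_xor : List Int × Int := ([3, 10, 5, 25, 2, 8], 2)

-- For every k < 0 A raises IndexError, while B (which never needs k) returns the basis maximum.
def Raises_k_alternating_max_xor (nums : List Int) (k : Int) : Prop := k < 0
instance (nums : List Int) (k : Int) : Decidable (Raises_k_alternating_max_xor nums k) := by
  unfold Raises_k_alternating_max_xor; infer_instance

def pvRaiseWitness_k_alternating_max_xor : List Int × Int := ([5], -1)
def pvRaiseWitnessOut_k_alternating_max_xor : Int := 5

def Spec_k_alternating_max_xor (nums : List Int) (k : Int) (out : Int) : Prop :=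
  out = k_alternating_max_xor_alt nums k
instance (nums : List Int) (k : Int) (out : Int) : Decidable (Spec_k_alternating_max_xor nums k out) := by
  unfold Spec_k_alternating_max_xor; infer_instance

-- ===== CLAIM (what is proved, stated in full; the proofs are below) =====
def Claim_equal_k_alternating_max_xor : Prop := ∀ (nums : List Int) (k : Int), Dom_k_alternating_max_xor nums k → Pre_k_alternating_max_xor nums k → Spec_k_alternating_max_xor nums k (k_alternating_max_xor nums k)

def Claim_raises_k_alternating_max_xor : Prop := (∀ (nums : List Int) (k : Int), Dom_k_alternating_max_xor nums k → Raises_k_alternating_max_xor nums k → ¬ Pre_k_alternating_max_xor nums k) ∧ (Dom_k_alternating_max_xor (pvRaiseWitness_k_alternating_max_xor.1) (pvRaiseWitness_k_alternating_max_xor.2) ∧ Raises_k_alternating_max_xor (pvRaiseWitness_k_alternating_max_xor.1) (pvRaiseWitness_k_alternating_max_xor.2) ∧ k_alternating_max_xor_alt (pvRaiseWitness_k_alternating_max_xor.1) (pvRaiseWitness_k_alternating_max_xor.2) = pvRaiseWitnessOut_k_alternating_max_xor)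

-- ===== LEMMAS AND PROOFS =====

-- bit-level bridge: the port's loop test 'band (x >>> i) 1 = 0' is 'Int.testBit x i = false'
theorem pv_band_ofNat_one (n : Nat) : PySem.Int.band (Int.ofNat n) 1 = Int.ofNat (n % 2) := by
  simp [PySem.Int.band, Nat.and_one_is_mod]

theorem pv_band_negSucc_one (n : Nat) :
    PySem.Int.band (Int.negSucc n) 1 = Int.ofNat (1 - n % 2) := by
  have h : ¬ (0:Int) ≤ Int.negSucc n := by simp [Int.negSucc_eq]; omega
  simp only [PySem.Int.band, if_neg h, if_pos (by norm_num : (0:Int) ≤ 1)]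
  norm_num [Int.negSucc_eq]

theorem pv_cond_iff (x : Int) (j : Nat) :
    PySem.Int.band (x >>> j) 1 = 0 ↔ Int.testBit x j = false := by
  rcases x with m | m
  · show PySem.Int.band (Int.ofNat (m >>> j)) 1 = 0 ↔ _
    rw [pv_band_ofNat_one, Nat.shiftRight_eq_div_pow]
    simp only [Int.testBit, Nat.testBit_eq_decide_div_mod_eq, Int.ofNat_eq_natCast,
      decide_eq_false_iff_not]
    omega
  · show PySem.Int.band (Int.negSucc (m >>> j)) 1 = 0 ↔ _
    rw [pv_band_negSucc_one, Nat.shiftRight_eq_div_pow]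
    simp only [Int.testBit, Nat.testBit_eq_decide_div_mod_eq, Int.ofNat_eq_natCast,
      Bool.not_eq_false', decide_eq_true_eq]
    omega

theorem pv_bxor_eq (a b : Int) : PySem.Int.bxor a b = Int.xor a b := by
  rcases a with m | m <;> rcases b with n | n <;>
    simp [PySem.Int.bxor, Int.xor, Int.negSucc_eq] <;> omega

theorem pv_testBit_bxor (a b : Int) (j : Nat) :
    Int.testBit (PySem.Int.bxor a b) j = xor (Int.testBit a j) (Int.testBit b j) := by
  rw [pv_bxor_eq]; exact Int.testBit_lxor a b j

theorem pv_ne_zero_of_testBit {x : Int} {j : Nat} (h : Int.testBit x j = true) : x ≠ 0 := by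
  rintro rfl
  simp [Int.testBit, Nat.zero_testBit] at h

-- well-formed basis: 31 slots; a nonzero slot t holds a vector with bit t set and bits t+1..30 clear
def pvWF (b : List Int) : Prop :=
  b.length = 31 ∧ ∀ j, j < 31 → b.getD j 0 ≠ 0 →
    (Int.testBit (b.getD j 0) j = true ∧
     ∀ j', j < j' → j' < 31 → Int.testBit (b.getD j 0) j' = false)

-- s is a sub-basis of b: every occupied slot of s is occupied by the same vector in b
def pvSub (s b : List Int) : Prop := ∀ j, s.getD j 0 ≠ 0 → b.getD j 0 = s.getD j 0

theorem pvSub_trans {a b c : List Int} (h1 : pvSub a b) (h2 : pvSub b c) : pvSub a c := by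
  intro j hj
  rw [h2 j (by rw [h1 j hj]; exact hj), h1 j hj]

theorem getD_set_self {α : Type} (l : List α) (i : Nat) (x d : α) (h : i < l.length) :
    (l.set i x).getD i d = x := by
  simp [List.getD_eq_getElem?_getD, h]

theorem getD_set_ne {α : Type} (l : List α) (i j : Nat) (x d : α) (h : j ≠ i) :
    (l.set i x).getD j d = l.getD j d := by
  simp [List.getD_eq_getElem?_getD, List.getElem?_set_ne (by omega : i ≠ j)]

theorem getD_replicate {α : Type} (n j : Nat) (a d : α) (h : j < n) :
    (List.replicate n a).getD j d = a := by
  rw [List.getD_eq_getElem _ _ (by simpa using h)]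
  exact List.getElem_replicate ..

theorem pv_getD_zeros (j : Nat) : pvZeros.getD j 0 = 0 := by
  by_cases h : j < 31
  · exact getD_replicate 31 j 0 0 h
  · exact List.getD_eq_default _ _ (by simp [pvZeros]; omega)

theorem pvInsertAux_succ (b : List Int) (x : Int) (i : Nat) :
    pvInsertAux b x (i+1) =
      if PySem.Int.band (x >>> i) 1 = 0 then pvInsertAux b x i
      else if b.getD i 0 = 0 then b.set i x
      else pvInsertAux b (PySem.Int.bxor x (b.getD i 0)) i := rfl

theorem pvInsertAux_getD_occupied (b : List Int) {j : Nat} (hj : b.getD j 0 ≠ 0) :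
    ∀ (i : Nat) (x : Int), (pvInsertAux b x i).getD j 0 = b.getD j 0 := by
  intro i
  induction i with
  | zero => intro x; rfl
  | succ m ih =>
    intro x
    unfold pvInsertAux
    split_ifs with h1 h2
    · exact ih x
    · exact getD_set_ne _ _ _ _ _ (by rintro rfl; exact hj h2)
    · exact ih _

theorem pvSub_insert (b : List Int) (x : Int) : pvSub b (pvInsert b x) := by
  intro j hj
  exact pvInsertAux_getD_occupied b hj 31 x

-- skipping clear bits: the insert loop from i equals the loop from i' ≤ i
theorem pvSkip (b : List Int) (x : Int) (i' : Nat) :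
    ∀ i, i' ≤ i → (∀ j, i' ≤ j → j < i → Int.testBit x j = false) →
    pvInsertAux b x i = pvInsertAux b x i' := by
  intro i
  induction i with
  | zero => intro h _; interval_cases i' ; rfl
  | succ m ih =>
    intro h hx
    rcases Nat.eq_or_lt_of_le h with rfl | h'
    · rfl
    · have hm : i' ≤ m := by omega
      have hc : PySem.Int.band (x >>> m) 1 = 0 :=
        (pv_cond_iff x m).mpr (hx m hm (by omega))
      rw [pvInsertAux_succ, if_pos hc]
      exact ih hm (fun j h1 h2 => hx j h1 (by omega))

theorem pvInsertAux_zero (b : List Int) (i : Nat) : pvInsertAux b 0 i = b := by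
  rw [pvSkip b 0 0 i (Nat.zero_le i) (fun j _ _ => by simp [Int.testBit, Nat.zero_testBit])]
  rfl

-- re-inserting a vector the basis already holds is a no-op
theorem pvReinsert (b : List Int) {t : Nat} {v : Int} (ht : t < 31)
    (hb : b.getD t 0 = v) (hv : v ≠ 0) (hbt : Int.testBit v t = true)
    (hhi : ∀ j, t < j → j < 31 → Int.testBit v j = false) :
    pvInsert b v = b := by
  unfold pvInsert
  rw [pvSkip b v (t+1) 31 (by omega) (fun j h1 h2 => hhi j (by omega) h2)]
  rw [pvInsertAux_succ, if_neg (by rw [pv_cond_iff]; simp [hbt]),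
    if_neg (by rw [hb]; exact hv), hb]
  simp only [PySem.Int.bxor_self]
  exact pvInsertAux_zero b t

-- wf is preserved by insertion
theorem pvWF_insertAux (b : List Int) (hb : pvWF b) :
    ∀ (i : Nat) (x : Int), i ≤ 31 → (∀ j, i ≤ j → j < 31 → Int.testBit x j = false) →
    pvWF (pvInsertAux b x i) := by
  intro i
  induction i with
  | zero => intro x _ _; exact hb
  | succ m ih =>
    intro x hi hx
    rw [pvInsertAux_succ]
    split_ifs with h1 h2
    · exact ih x (by omega) (fun j hj1 hj2 => by
        by_cases hej : j = m
        · rw [hej]; exact (pv_cond_iff x m).mp h1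
        · exact hx j (by omega) hj2)
    · constructor
      · simp [hb.1]
      · intro j hj hjne
        by_cases hjm : j = m
        · rw [hjm] at hjne ⊢
          rw [getD_set_self _ _ _ _ (by rw [hb.1]; omega : m < b.length)] at hjne ⊢
          refine ⟨?_, fun j' h1 h2 => hx j' (by omega) h2⟩
          have : Int.testBit x m ≠ false := fun hc => h1 ((pv_cond_iff x m).mpr hc)
          simpa using this
        · rw [getD_set_ne _ _ _ _ _ hjm] at hjne ⊢
          exact hb.2 j hj hjne
    · refine ih _ (by omega) (fun j hj1 hj2 => ?_)
      rw [pv_testBit_bxor]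
      by_cases hej : j = m
      · rw [hej]
        have hx1 : Int.testBit x m = true := by
          have : Int.testBit x m ≠ false := fun hc => h1 ((pv_cond_iff x m).mpr hc)
          simpa using this
        have hb1 : Int.testBit (b.getD m 0) m = true := (hb.2 m (by omega) h2).1
        simp only [List.getD_eq_getElem?_getD] at hb1
        simp [hx1, hb1]
      · have hx1 : Int.testBit x j = false := hx j (by omega) hj2
        have hb1 : Int.testBit (b.getD m 0) j = false :=
          (hb.2 m (by omega) h2).2 j (by omega) hj2
        simp only [List.getD_eq_getElem?_getD] at hb1
        simp [hx1, hb1]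

theorem pvWF_insert (b : List Int) (hb : pvWF b) (x : Int) : pvWF (pvInsert b x) :=
  pvWF_insertAux b hb 31 x (le_refl 31) (fun j hj1 hj2 => by omega)

theorem pvWF_zeros : pvWF pvZeros :=
  ⟨by simp [pvZeros], fun j hj hne => absurd (pv_getD_zeros j) hne⟩

-- the right-to-left accumulated basis both programs are about
def pvBasisOf (l : List Int) : List Int := l.foldr (fun x b => pvInsert b x) pvZeros

theorem pvWF_basisOf (l : List Int) : pvWF (pvBasisOf l) := by
  induction l with
  | nil => exact pvWF_zeros
  | cons x xs ih => exact pvWF_insert _ ih x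

theorem pvBasisOf_drop_sub (l : List Int) :
    ∀ (i j : Nat), i ≤ j → pvSub (pvBasisOf (l.drop j)) (pvBasisOf (l.drop i)) := by
  intro i j hij
  induction j, hij using Nat.le_induction with
  | base => intro a ha; exact rfl
  | succ m hm ih =>
    by_cases h : m < l.length
    · refine pvSub_trans (fun a ha => ?_) ih
      rw [List.drop_eq_getElem_cons h]
      exact pvSub_insert _ _ a ha
    · have : l.drop m = l.drop (m+1) := by
        rw [List.drop_eq_nil_of_le (by omega), List.drop_eq_nil_of_le (by omega)]
      rw [this] at ih; exact ih

-- the KEY simulation: inserting x into a sub-basis s of b either leaves s unchanged (and then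
-- leaves b unchanged too) or places a reduced vector v; b's insertion of x continues from v
theorem pvKey (s b : List Int) (hs : pvWF s) (hsub : pvSub s b) :
    ∀ (i : Nat) (x : Int), i ≤ 31 → (∀ j, i ≤ j → j < 31 → Int.testBit x j = false) →
    (pvInsertAux s x i = s ∧ pvInsertAux b x i = b) ∨
    (∃ t v, t < i ∧ s.getD t 0 = 0 ∧ Int.testBit v t = true ∧
       (∀ j, t < j → j < 31 → Int.testBit v j = false) ∧
       pvInsertAux s x i = s.set t v ∧ pvInsertAux b x i = pvInsertAux b v (t+1)) := by
  intro i
  induction i with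
  | zero => intro x _ _; exact Or.inl ⟨rfl, rfl⟩
  | succ m ih =>
    intro x hi hx
    by_cases h1 : PySem.Int.band (x >>> m) 1 = 0
    · have heq : ∀ (c : List Int), pvInsertAux c x (m+1) = pvInsertAux c x m := by
        intro c; rw [pvInsertAux_succ, if_pos h1]
      rcases ih x (by omega) (fun j hj1 hj2 => by
          by_cases hej : j = m
          · rw [hej]; exact (pv_cond_iff x m).mp h1
          · exact hx j (by omega) hj2) with ⟨e1, e2⟩ | ⟨t, v, ht, h3, h4, h5, h6, h7⟩
      · exact Or.inl ⟨by rw [heq]; exact e1, by rw [heq]; exact e2⟩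
      · exact Or.inr ⟨t, v, by omega, h3, h4, h5, by rw [heq]; exact h6, by rw [heq]; exact h7⟩
    · have hx1 : Int.testBit x m = true := by
        have : Int.testBit x m ≠ false := fun hc => h1 ((pv_cond_iff x m).mpr hc)
        simpa using this
      by_cases h2 : s.getD m 0 = 0
      · -- s places x at slot m; b's insertion is literally 'continue from stage m+1'
        refine Or.inr ⟨m, x, by omega, h2, hx1, fun j hj1 hj2 => hx j hj1 hj2, ?_, rfl⟩
        rw [pvInsertAux_succ, if_neg h1, if_pos h2]
      · -- occupied in s, hence same vector in b: both xor it and recurse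
        have hbm : b.getD m 0 = s.getD m 0 := hsub m h2
        have hnew : ∀ j, m ≤ j → j < 31 → Int.testBit (PySem.Int.bxor x (s.getD m 0)) j = false := by
          intro j hj1 hj2
          rw [pv_testBit_bxor]
          by_cases hej : j = m
          · rw [hej]
            have e2 : Int.testBit (s.getD m 0) m = true := (hs.2 m (by omega) h2).1
            simp only [List.getD_eq_getElem?_getD] at e2
            simp [hx1, e2]
          · have e1 : Int.testBit x j = false := hx j (by omega) hj2
            have e2 : Int.testBit (s.getD m 0) j = false :=
              (hs.2 m (by omega) h2).2 j (by omega) hj2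
            simp only [List.getD_eq_getElem?_getD] at e2
            simp [e1, e2]
        have heqs : pvInsertAux s x (m+1) = pvInsertAux s (PySem.Int.bxor x (s.getD m 0)) m := by
          rw [pvInsertAux_succ, if_neg h1, if_neg h2]
        have heqb : pvInsertAux b x (m+1) = pvInsertAux b (PySem.Int.bxor x (s.getD m 0)) m := by
          rw [pvInsertAux_succ, if_neg h1, if_neg (by rw [hbm]; exact h2), hbm]
        rcases ih (PySem.Int.bxor x (s.getD m 0)) (by omega) hnew with ⟨e1, e2⟩ | ⟨t, v, ht, h3, h4, h5, h6, h7⟩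
        · exact Or.inl ⟨by rw [heqs]; exact e1, by rw [heqb]; exact e2⟩
        · exact Or.inr ⟨t, v, by omega, h3, h4, h5, by rw [heqs]; exact h6, by rw [heqb]; exact h7⟩

-- merging a sub-basis of b into b is a no-op
theorem pv_drop_nil {α : Type} {s : List α} {m : Nat} (h : ([] : List α) = s.drop m) :
    s.length ≤ m := by
  by_contra hc
  rw [List.drop_eq_getElem_cons (by omega : m < s.length)] at h
  exact List.cons_ne_nil _ _ h.symm

theorem pv_drop_cons {α : Type} {s : List α} {m : Nat} {w : α} {rest : List α}
    (h : w :: rest = s.drop m) :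
    m < s.length ∧ (∀ d : α, s.getD m d = w) ∧ rest = s.drop (m+1) := by
  have hm : m < s.length := by
    by_contra hc
    rw [List.drop_eq_nil_of_le (by omega)] at h
    exact List.cons_ne_nil _ _ h
  have h2 := List.drop_eq_getElem_cons hm
  rw [← h] at h2
  injection h2 with ha hb
  exact ⟨hm, fun d => by rw [List.getD_eq_getElem _ _ hm, ← ha], hb⟩

theorem pvMerge_noop_aux (s b : List Int) (hs : pvWF s) (hsub : pvSub s b) :
    ∀ (l : List Int) (m : Nat), l = s.drop m →
    l.foldl (fun d v => if v ≠ 0 then pvInsert d v else d) b = b := by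
  intro l
  induction l with
  | nil => intro m _; rfl
  | cons w rest ih =>
    intro m hl
    obtain ⟨hm, hwD, hrest⟩ := pv_drop_cons hl
    have hw : w = s.getD m 0 := (hwD 0).symm
    have hm31 : m < 31 := by rw [hs.1] at hm; exact hm
    simp only [List.foldl_cons]
    by_cases hw0 : w = 0
    · rw [if_neg (by simp [hw0])]
      exact ih (m+1) hrest
    · have hwne : s.getD m 0 ≠ 0 := by rw [show s.getD m 0 = w from hw.symm]; exact hw0
      have hins : pvInsert b w = b := by
        refine pvReinsert b hm31 ?_ hw0 ?_ ?_
        · rw [hsub m hwne, ← hw]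
        · rw [hw]; exact (hs.2 m hm31 hwne).1
        · rw [hw]; exact (hs.2 m hm31 hwne).2
      rw [if_pos hw0, hins]
      exact ih (m+1) hrest

theorem pvMerge_noop (s b : List Int) (hs : pvWF s) (hsub : pvSub s b) :
    pvMerge b s = b :=
  pvMerge_noop_aux s b hs hsub s 0 rfl

-- merging a wf basis into an empty basis reproduces it exactly
theorem pvMerge_zeros_aux (s : List Int) (hs : pvWF s) :
    ∀ (l : List Int) (m : Nat) (d : List Int), l = s.drop m → d.length = 31 →
    (∀ j, j < 31 → d.getD j 0 = if j < m then s.getD j 0 else 0) →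
    l.foldl (fun d v => if v ≠ 0 then pvInsert d v else d) d = s := by
  intro l
  induction l with
  | nil =>
    intro m d hl hlen hd
    have hm : s.length ≤ m := pv_drop_nil hl
    simp only [List.foldl_nil]
    apply List.ext_getElem (by rw [hlen, hs.1])
    intro j h1 h2
    have hj : j < 31 := by omega
    have := hd j hj
    rw [if_pos (by rw [hs.1] at hm; omega)] at this
    rw [← List.getD_eq_getElem d 0 h1, ← List.getD_eq_getElem s 0 h2, this]
  | cons w rest ih =>
    intro m d hl hlen hd
    obtain ⟨hm, hwD, hrest⟩ := pv_drop_cons hl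
    have hw : w = s.getD m 0 := (hwD 0).symm
    have hm31 : m < 31 := by rw [hs.1] at hm; exact hm
    simp only [List.foldl_cons]
    by_cases hw0 : w = 0
    · rw [if_neg (by simp [hw0])]
      refine ih (m+1) d hrest hlen (fun j hj => ?_)
      rw [hd j hj]
      by_cases hjm : j = m
      · rw [hjm, if_neg (by omega), if_pos (by omega), ← hw, hw0]
      · by_cases h' : j < m
        · rw [if_pos h', if_pos (by omega)]
        · rw [if_neg h', if_neg (by omega)]
    · rw [if_pos hw0]
      have hwne : s.getD m 0 ≠ 0 := by rw [← hw]; exact hw0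
      have hbt := (hs.2 m hm31 hwne).1
      have hhi := (hs.2 m hm31 hwne).2
      have hins : pvInsert d w = d.set m w := by
        unfold pvInsert
        rw [pvSkip d w (m+1) 31 (by omega) (fun j h1 h2 => by rw [hw]; exact hhi j (by omega) h2)]
        rw [pvInsertAux_succ, if_neg (by
            rw [pv_cond_iff, hw]
            simp only [List.getD_eq_getElem?_getD] at hbt
            simp [hbt]),
          if_pos (by rw [hd m hm31, if_neg (by omega)])]
      rw [hins]
      refine ih (m+1) (d.set m w) hrest (by simp [hlen]) (fun j hj => ?_)
      by_cases hjm : j = m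
      · rw [hjm, getD_set_self _ _ _ _ (by omega), if_pos (by omega), hw]
      · rw [getD_set_ne _ _ _ _ _ hjm, hd j hj]
        by_cases h' : j < m
        · rw [if_pos h', if_pos (by omega)]
        · rw [if_neg h', if_neg (by omega)]

theorem pvMerge_zeros (s : List Int) (hs : pvWF s) : pvMerge pvZeros s = s :=
  pvMerge_zeros_aux s hs s 0 pvZeros rfl (by simp [pvZeros])
    (fun j hj => by rw [if_neg (by omega)]; exact pv_getD_zeros j)

-- the heart: merging (insert s x) into b ⊒ s equals inserting x into b directly
theorem pvMerge_set_aux (s b : List Int) (hs : pvWF s) (hsub : pvSub s b)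
    {t : Nat} {v : Int} (ht : t < 31) (hbt : Int.testBit v t = true) :
    ∀ (l : List Int) (m : Nat) (d : List Int), l = (s.set t v).drop m →
    (m ≤ t → d = b) → (t < m → d = pvInsert b v) →
    l.foldl (fun d v => if v ≠ 0 then pvInsert d v else d) d = pvInsert b v := by
  have hlen : s.length = 31 := hs.1
  intro l
  induction l with
  | nil =>
    intro m d hl hle hgt
    have hm : s.length ≤ m := by
      have := pv_drop_nil hl
      simpa using this
    exact hgt (by omega)
  | cons w rest ih =>
    intro m d hl hle hgt
    obtain ⟨hm, hwD, hrest⟩ := pv_drop_cons hl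
    have hw : w = (s.set t v).getD m 0 := (hwD 0).symm
    have hm31 : m < 31 := by simp [hlen] at hm; exact hm
    simp only [List.foldl_cons]
    by_cases hmt : m = t
    · -- the freshly placed vector: d is still b; inserting it turns d into pvInsert b v
      have hwv : w = v := by
        rw [hw, hmt, getD_set_self _ _ _ _ (by omega : t < s.length)]
      have hv0 : v ≠ 0 := pv_ne_zero_of_testBit hbt
      rw [if_pos (by rw [hwv]; exact hv0), hwv, hle (by omega)]
      exact ih (m+1) (pvInsert b v) hrest (by omega) (fun _ => rfl)
    · have hwm : w = s.getD m 0 := by rw [hw, getD_set_ne _ _ _ _ _ hmt]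
      by_cases hw0 : w = 0
      · rw [if_neg (by simp [hw0])]
        refine ih (m+1) d hrest (fun h => hle (by omega)) (fun h => ?_)
        rcases Nat.lt_or_ge t m with h' | h'
        · exact hgt h'
        · omega
      · -- an old vector of s: present identically in d (= b or insert b v): no-op
        have hwne : s.getD m 0 ≠ 0 := by rw [← hwm]; exact hw0
        have hbm : b.getD m 0 = s.getD m 0 := hsub m hwne
        have hdm : d.getD m 0 = w := by
          rcases Nat.lt_or_ge t m with h' | h'
          · rw [hgt h', hwm, ← hbm]
            exact pvInsertAux_getD_occupied b (by rw [hbm]; exact hwne) 31 v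
          · rw [hle (by omega), hbm, hwm]
        have hins : pvInsert d w = d := by
          refine pvReinsert d hm31 hdm hw0 ?_ ?_
          · rw [hwm]; exact (hs.2 m hm31 hwne).1
          · rw [hwm]; exact (hs.2 m hm31 hwne).2
        rw [if_pos hw0, hins]
        exact ih (m+1) d hrest (fun h => hle (by omega)) (fun h => hgt (by omega))

theorem pvMergeInsert (s b : List Int) (hs : pvWF s) (hsub : pvSub s b) (x : Int) :
    pvMerge b (pvInsert s x) = pvInsert b x := by
  rcases pvKey s b hs hsub 31 x (le_refl 31) (fun j h1 h2 => by omega) with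
    ⟨e1, e2⟩ | ⟨t, v, ht, h3, h4, h5, h6, h7⟩
  · show pvMerge b (pvInsertAux s x 31) = pvInsertAux b x 31
    rw [e1, e2]
    exact pvMerge_noop s b hs hsub
  · show pvMerge b (pvInsertAux s x 31) = pvInsertAux b x 31
    rw [h6, h7]
    have hskip : pvInsertAux b v (t+1) = pvInsert b v := by
      unfold pvInsert
      rw [pvSkip b v (t+1) 31 (by omega) (fun j hj1 hj2 => h5 j (by omega) hj2)]
    rw [hskip]
    exact pvMerge_set_aux s b hs hsub ht h4 _ 0 b rfl (fun _ => rfl)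
      (fun h => by omega)

-- the invariant of A's downward DP loop
def pvInv (nums : List Int) (R : Nat) (i : Nat) (B : List (List Int)) : Prop :=
  B.length = R ∧ ∀ j, j < R →
    B.getD j [] = if i ≤ j then pvBasisOf (nums.drop j) else pvZeros

theorem pvStep_inv (nums : List Int) (k : Int) (R : Nat)
    (hR : R = nums.length + k.toNat + 1) (i : Nat) (hi : i < nums.length)
    (B : List (List Int)) (hB : pvInv nums R (i+1) B) :
    pvInv nums R i (pvStepA nums k B i) := by
  have hiR : i < R := by omega
  have hi1R : i + 1 < R := by omega
  have hikR : i + k.toNat < R := by omega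
  have hBi : B.getD i [] = pvZeros := by rw [hB.2 i hiR, if_neg (by omega)]
  have hBi1 : B.getD (i+1) [] = pvBasisOf (nums.drop (i+1)) := by
    rw [hB.2 (i+1) hi1R, if_pos (by omega)]
  have hchoose : pvSub (B.getD (i + k.toNat) []) (pvBasisOf (nums.drop (i+1))) ∧
      pvWF (B.getD (i + k.toNat) []) := by
    by_cases hk0 : k.toNat = 0
    · rw [hk0]
      simp only [Nat.add_zero]
      rw [hBi]
      exact ⟨fun j hj => absurd (pv_getD_zeros j) hj, pvWF_zeros⟩
    · have : i + 1 ≤ i + k.toNat := by omega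
      rw [hB.2 (i + k.toNat) hikR, if_pos (by omega)]
      exact ⟨pvBasisOf_drop_sub nums (i+1) (i + k.toNat) (by omega), pvWF_basisOf _⟩
  have hcur : pvMerge (B.getD i []) (B.getD (i+1) []) = pvBasisOf (nums.drop (i+1)) := by
    rw [hBi, hBi1]
    exact pvMerge_zeros _ (pvWF_basisOf _)
  have hmain : pvMerge (pvBasisOf (nums.drop (i+1)))
      (pvInsert (B.getD (i + k.toNat) []) (nums.getD i 0)) =
      pvInsert (pvBasisOf (nums.drop (i+1))) (nums.getD i 0) :=
    pvMergeInsert _ _ hchoose.2 hchoose.1 _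
  have hdrop : pvInsert (pvBasisOf (nums.drop (i+1))) (nums.getD i 0) = pvBasisOf (nums.drop i) := by
    rw [List.getD_eq_getElem _ _ hi]
    show _ = pvBasisOf (nums.drop i)
    rw [List.drop_eq_getElem_cons hi]
    rfl
  constructor
  · simp [pvStepA, hB.1]
  · intro j hj
    unfold pvStepA
    simp only
    by_cases hji : j = i
    · subst hji
      rw [getD_set_self _ _ _ _ (by rw [hB.1]; exact hiR), hcur, hmain, hdrop, if_pos (le_refl j)]
    · rw [getD_set_ne _ _ _ _ _ hji, hB.2 j hj]
      by_cases h' : i ≤ j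
      · rw [if_pos (by omega), if_pos h']
      · rw [if_neg (by omega), if_neg h']

theorem pvFold_inv (nums : List Int) (k : Int) (R : Nat)
    (hR : R = nums.length + k.toNat + 1) :
    ∀ (i : Nat), i ≤ nums.length → ∀ (B : List (List Int)), pvInv nums R i B →
    pvInv nums R 0 (((List.range i).reverse).foldl (pvStepA nums k) B) := by
  intro i
  induction i with
  | zero => intro _ B hB; exact hB
  | succ m ih =>
    intro hm B hB
    rw [List.range_succ, List.reverse_append, List.reverse_singleton]
    simp only [List.singleton_append, List.foldl_cons]
    exact ih (by omega) _ (pvStep_inv nums k R hR m (by omega) B hB)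

-- A's whole DP collapses to the single accumulated basis
theorem pvA_eq_basis (nums : List Int) (k : Int) (hk : 0 ≤ k) :
    k_alternating_max_xor nums k = pvMaxXor (pvBasisOf nums) := by
  unfold k_alternating_max_xor
  simp only
  set R := ((nums.length : Int) + k + 1).toNat with hRdef
  have hR : R = nums.length + k.toNat + 1 := by omega
  have hinv0 : pvInv nums R nums.length (List.replicate R pvZeros) := by
    constructor
    · simp
    · intro j hj
      have hrep : (List.replicate R pvZeros).getD j [] = pvZeros :=
        getD_replicate R j pvZeros [] hj
      rw [hrep]
      by_cases h : nums.length ≤ j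
      · rw [if_pos h, List.drop_eq_nil_of_le h]
        rfl
      · rw [if_neg h]
  have hfin := pvFold_inv nums k R hR nums.length (le_refl _) _ hinv0
  have h0R : 0 < R := by omega
  have hB0 : (((List.range nums.length).reverse).foldl (pvStepA nums k)
      (List.replicate R pvZeros)).getD 0 [] = pvBasisOf nums := by
    rw [hfin.2 0 h0R, if_pos (le_refl 0)]
    rfl
  rw [hB0]

-- ===================== B-side lemmas =====================

-- n &&& m and n.ldiff m partition the bits of n
theorem pv_and_add_ldiff (n : Nat) : ∀ m, (n &&& m) + n.ldiff m = n := by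
  induction n using Nat.binaryRec with
  | zero => intro m; simp [Nat.zero_and, Nat.ldiff]
  | bit b n ih =>
    intro m
    rw [← Nat.bit_bodd_div2 m, Nat.land_bit, Nat.ldiff_bit]
    have h := ih m.div2
    rcases b <;> rcases m.bodd <;>
      simp [Nat.bit_val] <;> omega

-- PySem's Python-exact '&' agrees with Mathlib's Int.land
theorem pv_band_eq (a b : Int) : PySem.Int.band a b = Int.land a b := by
  rcases a with m | m <;> rcases b with n | n
  · simp [PySem.Int.band, Int.land]
  · have h := pv_and_add_ldiff m n
    simp [PySem.Int.band, Int.land, Int.negSucc_eq]; omega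
  · have h := pv_and_add_ldiff n m
    simp [PySem.Int.band, Int.land, Int.negSucc_eq]; omega
  · simp [PySem.Int.band, Int.land, Int.negSucc_eq]; omega

theorem pv_band_mask_nonneg (x : Int) : 0 ≤ PySem.Int.band x pvMaskB := by
  rw [pv_band_eq]
  rcases x with m | m <;> simp [Int.land, pvMaskB]

-- the masked value's bits are exactly x's bits below 31
theorem pv_testBit_mask (x : Int) (j : Nat) :
    Nat.testBit (PySem.Int.band x pvMaskB).toNat j = (Int.testBit x j && decide (j < 31)) := by
  have h0 : (0:Int) ≤ PySem.Int.band x pvMaskB := pv_band_mask_nonneg x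
  have h1 : PySem.Int.band x pvMaskB = Int.ofNat (PySem.Int.band x pvMaskB).toNat :=
    (Int.toNat_of_nonneg h0).symm
  have h2 : Nat.testBit (PySem.Int.band x pvMaskB).toNat j
      = Int.testBit (PySem.Int.band x pvMaskB) j := by
    rw [h1]; rfl
  rw [h2, pv_band_eq, Int.testBit_land]
  have h3 : Int.testBit pvMaskB j = decide (j < 31) := by
    show Int.testBit (Int.ofNat (2^31 - 1)) j = decide (j < 31)
    show Nat.testBit (2^31 - 1) j = decide (j < 31)
    exact Nat.testBit_two_pow_sub_one ..
  rw [h3]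

theorem pv_mask_lt (x : Int) : (PySem.Int.band x pvMaskB).toNat < 2^31 := by
  refine Nat.lt_pow_two_of_testBit _ (fun i hi => ?_)
  rw [pv_testBit_mask]
  simp [show ¬ i < 31 by omega]

theorem pvBitLen_zero (f : Nat) : pvBitLen f 0 = 0 := by
  cases f <;> simp [pvBitLen]

-- the hand-ported bit_length: for 0 < n < 2^fuel it returns the index of the top set bit, plus one
theorem pvBitLen_spec : ∀ (fuel n : Nat), n ≠ 0 → n < 2^fuel →
    1 ≤ pvBitLen fuel n ∧ 2^(pvBitLen fuel n - 1) ≤ n ∧ n < 2^(pvBitLen fuel n) := by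
  intro fuel
  induction fuel with
  | zero => intro n h1 h2; omega
  | succ f ih =>
    intro n h1 h2
    rw [pvBitLen, if_neg h1]
    by_cases hh : n / 2 = 0
    · have hn1 : n = 1 := by omega
      subst hn1
      simp [show (1:Nat)/2 = 0 from rfl, pvBitLen_zero]
    · have hlt : n / 2 < 2^f := by
        rw [Nat.pow_succ] at h2; omega
      obtain ⟨e1, e2, e3⟩ := ih (n/2) hh hlt
      refine ⟨by omega, ?_, ?_⟩
      · have : 2 ^ (pvBitLen f (n / 2) + 1 - 1) = 2 * 2 ^ (pvBitLen f (n/2) - 1) := by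
          rw [show pvBitLen f (n/2) + 1 - 1 = (pvBitLen f (n/2) - 1) + 1 by omega, Nat.pow_succ]
          ring
        rw [this]; omega
      · rw [Nat.pow_succ]; omega

-- the top set bit of the masked value, as computed by B
theorem pv_pivot_spec (x : Int) (hm : PySem.Int.band x pvMaskB ≠ 0) :
    Int.testBit x (pvBitLen 32 (PySem.Int.band x pvMaskB).toNat - 1) = true ∧
    (pvBitLen 32 (PySem.Int.band x pvMaskB).toNat - 1) < 31 ∧
    (∀ j, (pvBitLen 32 (PySem.Int.band x pvMaskB).toNat - 1) < j → j < 31 →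
      Int.testBit x j = false) := by
  set M := (PySem.Int.band x pvMaskB).toNat with hM
  have hM0 : M ≠ 0 := by
    have := pv_band_mask_nonneg x
    omega
  have hMlt : M < 2^31 := pv_mask_lt x
  obtain ⟨e1, e2, e3⟩ := pvBitLen_spec 32 M hM0 (by omega)
  set p := pvBitLen 32 M - 1 with hp
  have hplt : p < 31 := by
    by_contra hc
    have : 2^31 ≤ 2^p := Nat.pow_le_pow_right (by omega) (by omega)
    omega
  have htop : M.testBit p = true := by
    have hdiv : M / 2^p = 1 := by
      refine Nat.div_eq_of_lt_le (by simpa using e2) ?_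
      have : 2^(p+1) = 2 * 2^p := by rw [Nat.pow_succ]; ring
      have hple : pvBitLen 32 M ≤ p + 1 := by omega
      have : 2^(pvBitLen 32 M) ≤ 2^(p+1) := Nat.pow_le_pow_right (by omega) hple
      omega
    rw [Nat.testBit_eq_decide_div_mod_eq, hdiv]
    simp
  have hhigh : ∀ j, p < j → M.testBit j = false := by
    intro j hj
    refine Nat.testBit_lt_two_pow ?_
    have h1 : pvBitLen 32 M ≤ j := by omega
    have : 2^(pvBitLen 32 M) ≤ 2^j := Nat.pow_le_pow_right (by omega) h1
    omega
  refine ⟨?_, hplt, ?_⟩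
  · have := pv_testBit_mask x p
    rw [← hM] at this
    rw [htop] at this
    simp [show p < 31 from hplt] at this
    exact this
  · intro j hj1 hj2
    have := pv_testBit_mask x j
    rw [← hM, hhigh j hj1] at this
    simp [show j < 31 from hj2] at this
    exact this

theorem pv_mask_zero_bits (x : Int) (h : PySem.Int.band x pvMaskB = 0) :
    ∀ j, j < 31 → Int.testBit x j = false := by
  intro j hj
  have := pv_testBit_mask x j
  rw [h] at this
  simp only [Int.toNat_zero, Nat.zero_testBit] at this
  simp [show j < 31 from hj] at this
  exact this

-- correspondence between B's pivot dict and A's 31-slot basis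
def pvRel (d : PySem.Dict Int Int) (b : List Int) : Prop :=
  (∀ j : Nat, j < 31 → PySem.Dict.get? d (Int.ofNat j) =
      (if b.getD j 0 = 0 then none else some (b.getD j 0))) ∧
  (∀ p ∈ PySem.Dict.keys d, ∃ j : Nat, j < 31 ∧ p = Int.ofNat j) ∧
  (PySem.Dict.keys d).Nodup

theorem pvRel_empty : pvRel PySem.Dict.empty pvZeros := by
  refine ⟨fun j hj => ?_, fun p hp => ?_, ?_⟩
  · rw [pv_getD_zeros j]
    simp [PySem.Dict.get?_empty]
  · simp [PySem.Dict.keys_empty] at hp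
  · simp [PySem.Dict.keys_empty]

-- one insertion: B's while-loop and A's bit scan build corresponding structures
theorem pvInsB_rel : ∀ (fuel : Nat) (x : Int) (d : PySem.Dict Int Int) (b : List Int),
    pvRel d b → pvWF b →
    (PySem.Int.band x pvMaskB = 0 ∨ pvBitLen 32 (PySem.Int.band x pvMaskB).toNat - 1 < fuel) →
    pvRel (pvInsB d x fuel) (pvInsert b x) := by
  intro fuel
  induction fuel with
  | zero =>
    intro x d b hrel hwf hf
    rcases hf with hf | hf
    · have hskip : pvInsert b x = b := by
        unfold pvInsert
        rw [pvSkip b x 0 31 (by omega) (fun j _ hj => pv_mask_zero_bits x hf j hj)]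
        rfl
      rw [hskip]
      exact hrel
    · omega
  | succ f ih =>
    intro x d b hrel hwf hf
    rw [pvInsB]
    simp only
    by_cases hm : PySem.Int.band x pvMaskB = 0
    · rw [if_pos hm]
      have hskip : pvInsert b x = b := by
        unfold pvInsert
        rw [pvSkip b x 0 31 (by omega) (fun j _ hj => pv_mask_zero_bits x hm j hj)]
        rfl
      rw [hskip]
      exact hrel
    · rw [if_neg hm]
      obtain ⟨htop, hplt, hhigh⟩ := pv_pivot_spec x hm
      set p := pvBitLen 32 (PySem.Int.band x pvMaskB).toNat - 1 with hp
      have hins1 : pvInsert b x = pvInsertAux b x (p+1) := by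
        unfold pvInsert
        exact pvSkip b x (p+1) 31 (by omega) (fun j h1 h2 => hhigh j (by omega) h2)
      by_cases hocc : b.getD p 0 = 0
      · -- empty slot: A sets slot p, B inserts key p
        have hget : PySem.Dict.get? d (Int.ofNat p) = none := by
          rw [hrel.1 p hplt, if_pos hocc]
        rw [hget]
        have hins2 : pvInsert b x = b.set p x := by
          rw [hins1, pvInsertAux_succ,
            if_neg (by rw [pv_cond_iff]; simp [htop]), if_pos hocc]
        rw [hins2]
        refine ⟨fun j hj => ?_, fun q hq => ?_, ?_⟩
        · rw [PySem.Dict.get?_insert]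
          by_cases hjp : j = p
          · subst hjp
            rw [if_pos rfl, getD_set_self _ _ _ _ (by rw [hwf.1]; omega)]
            have hx0 : x ≠ 0 := pv_ne_zero_of_testBit htop
            rw [if_neg hx0]
          · rw [if_neg (by simp [Int.ofNat_eq_natCast]; omega),
              getD_set_ne _ _ _ _ _ hjp, hrel.1 j hj]
        · rw [PySem.Dict.mem_keys_insert] at hq
          rcases hq with rfl | hq
          · exact ⟨p, hplt, rfl⟩
          · exact hrel.2.1 q hq
        · exact PySem.Dict.nodup_keys_insert _ _ _ hrel.2.2
      · -- occupied: both xor the stored vector and continue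
        have hget : PySem.Dict.get? d (Int.ofNat p) = some (b.getD p 0) := by
          rw [hrel.1 p hplt, if_neg hocc]
        rw [hget]
        set x' := PySem.Int.bxor x (b.getD p 0) with hx'
        have hxbits : ∀ j, p ≤ j → j < 31 → Int.testBit x' j = false := by
          intro j hj1 hj2
          rw [hx', pv_testBit_bxor]
          by_cases hjp : j = p
          · have e2 : Int.testBit (b.getD p 0) p = true := (hwf.2 p hplt hocc).1
            simp only [List.getD_eq_getElem?_getD] at e2
            rw [hjp]
            simp [htop, e2]
          · have e1 : Int.testBit x j = false := hhigh j (by omega) hj2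
            have e2 : Int.testBit (b.getD p 0) j = false :=
              (hwf.2 p hplt hocc).2 j (by omega) hj2
            simp only [List.getD_eq_getElem?_getD] at e2
            simp [e1, e2]
        have hins3 : pvInsert b x = pvInsert b x' := by
          rw [hins1, pvInsertAux_succ,
            if_neg (by rw [pv_cond_iff]; simp [htop]), if_neg hocc, ← hx']
          unfold pvInsert
          rw [pvSkip b x' p 31 (by omega) (fun j h1 h2 => hxbits j h1 h2)]
        rw [hins3]
        refine ih x' d b hrel hwf ?_
        by_cases hm' : PySem.Int.band x' pvMaskB = 0
        · exact Or.inl hm'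
        · right
          have hM'lt : (PySem.Int.band x' pvMaskB).toNat < 2^p := by
            refine Nat.lt_pow_two_of_testBit _ (fun i hi => ?_)
            rw [pv_testBit_mask]
            by_cases hi31 : i < 31
            · rw [hxbits i hi hi31]; rfl
            · simp [show ¬ i < 31 from hi31]
          have hM'0 : (PySem.Int.band x' pvMaskB).toNat ≠ 0 := by
            have := pv_band_mask_nonneg x'
            omega
          obtain ⟨e1, e2, e3⟩ := pvBitLen_spec 32 _ hM'0
            (by have : (2:Nat)^p < 2^32 := Nat.pow_lt_pow_right (by omega) (by omega); omega)
          have : 2^(pvBitLen 32 (PySem.Int.band x' pvMaskB).toNat - 1) < 2^p := by omega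
          have hlt : pvBitLen 32 (PySem.Int.band x' pvMaskB).toNat - 1 < p :=
            (Nat.pow_lt_pow_iff_right (by omega)).mp this
          omega

-- the fold over all elements
theorem pvFoldB_rel : ∀ (l : List Int) (d : PySem.Dict Int Int) (b : List Int),
    pvRel d b → pvWF b →
    pvRel (l.foldl (fun d x => pvInsB d x 32) d) (l.foldl (fun b x => pvInsert b x) b) := by
  intro l
  induction l with
  | nil => intro d b h _; exact h
  | cons x xs ih =>
    intro d b hrel hwf
    simp only [List.foldl_cons]
    refine ih _ _ (pvInsB_rel 32 x d b hrel hwf ?_) (pvWF_insert b hwf x)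
    by_cases hm : PySem.Int.band x pvMaskB = 0
    · exact Or.inl hm
    · right
      have hM0 : (PySem.Int.band x pvMaskB).toNat ≠ 0 := by
        have := pv_band_mask_nonneg x
        omega
      have hMlt := pv_mask_lt x
      have h32 : (2:Nat)^31 < 2^32 := by norm_num
      obtain ⟨e1, e2, e3⟩ := pvBitLen_spec 32 _ hM0 (lt_trans hMlt h32)
      have hlt2 : 2^(pvBitLen 32 (PySem.Int.band x pvMaskB).toNat - 1) < 2^32 := by omega
      exact (Nat.pow_lt_pow_iff_right (by omega)).mp hlt2

-- descending list of occupied pivots of an array basis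
def pvOccDesc (b : List Int) (i : Nat) : List Int :=
  List.map (fun j : Nat => (j : Int))
    (List.filter (fun j => decide (b.getD j 0 ≠ 0)) ((List.range i).reverse))

theorem pv_mem_occDesc (b : List Int) (i : Nat) (q : Int) :
    q ∈ pvOccDesc b i ↔ ∃ j : Nat, j < i ∧ q = (j : Int) ∧ b.getD j 0 ≠ 0 := by
  simp only [pvOccDesc, List.mem_map, List.mem_filter, List.mem_reverse, List.mem_range,
    decide_eq_true_eq]
  constructor
  · rintro ⟨j, ⟨hj1, hj2⟩, rfl⟩
    exact ⟨j, hj1, rfl, hj2⟩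
  · rintro ⟨j, hj1, rfl, hj2⟩
    exact ⟨j, ⟨hj1, hj2⟩, rfl⟩

theorem pv_nodup_occDesc (b : List Int) (i : Nat) : (pvOccDesc b i).Nodup := by
  refine List.Nodup.map (fun a c h => by omega) ?_
  exact List.Nodup.filter _ (List.nodup_reverse.mpr (List.nodup_range))

theorem pv_pairwise_occDesc (b : List Int) (i : Nat) :
    (pvOccDesc b i).Pairwise (fun a c => c < a) := by
  unfold pvOccDesc
  rw [List.pairwise_map]
  refine List.Pairwise.filter _ ?_
  rw [List.pairwise_reverse]
  refine List.pairwise_lt_range.imp ?_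
  intro a c h
  exact_mod_cast h

-- B's sorted pivot list is exactly the descending occupied-slot list
theorem pv_sorted_keys (d : PySem.Dict Int Int) (b : List Int) (hrel : pvRel d b) :
    PySem.List.sorted (PySem.Dict.keys d) (fun p => p) true = pvOccDesc b 31 := by
  refine PySem.List.sorted_rev_eq_of_perm_of_pairwise_gt _ _ _ ?_ (pv_pairwise_occDesc b 31)
  refine (List.perm_ext_iff_of_nodup (pv_nodup_occDesc b 31) hrel.2.2).2 (fun q => ?_)
  rw [pv_mem_occDesc]
  constructor
  · rintro ⟨j, hj1, rfl, hj2⟩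
    have := hrel.1 j hj1
    rw [if_neg hj2] at this
    have hne : PySem.Dict.get? d (Int.ofNat j) ≠ none := by rw [this]; simp
    have := (PySem.Dict.get?_eq_none_iff_not_mem_keys d (Int.ofNat j))
    by_contra hc
    exact hne (this.2 hc)
  · intro hq
    obtain ⟨j, hj1, rfl⟩ := hrel.2.1 q hq
    refine ⟨j, hj1, rfl, ?_⟩
    intro h0
    have := hrel.1 j hj1
    rw [if_pos h0] at this
    exact ((PySem.Dict.get?_eq_none_iff_not_mem_keys d (Int.ofNat j)).1 this) hq

-- the greedy fold over the descending pivots equals A's max_xor scan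
theorem pv_fold_occ (d : PySem.Dict Int Int) (b : List Int) (hrel : pvRel d b) :
    ∀ (i : Nat), i ≤ 31 → ∀ (res : Int),
    (pvOccDesc b i).foldl (fun res p => max res (PySem.Int.bxor res (PySem.Dict.getD d p 0))) res
      = pvMaxXorAux b res i := by
  intro i
  induction i with
  | zero => intro _ res; rfl
  | succ m ih =>
    intro hm res
    have hsplit : pvOccDesc b (m+1) =
        (if b.getD m 0 ≠ 0 then [(m : Int)] else []) ++ pvOccDesc b m := by
      unfold pvOccDesc
      rw [List.range_succ, List.reverse_append, List.reverse_singleton]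
      simp only [List.singleton_append, List.filter_cons]
      by_cases h : b.getD m 0 ≠ 0
      · rw [if_pos (by simpa using h), if_pos h, List.map_cons]
        rfl
      · rw [if_neg (by simpa using h), if_neg h, List.nil_append]
    rw [hsplit, pvMaxXorAux]
    by_cases h : b.getD m 0 ≠ 0
    · rw [if_pos h]
      simp only [List.singleton_append, List.foldl_cons]
      have hget : PySem.Dict.getD d (m : Int) 0 = b.getD m 0 := by
        rw [PySem.Dict.getD_eq_get?_getD]
        have := hrel.1 m (by omega)
        rw [if_neg h] at this
        rw [show ((m:Int)) = Int.ofNat m from rfl, this]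
        rfl
      rw [hget]
      have hmax : max res (PySem.Int.bxor res (b.getD m 0)) =
          if res < PySem.Int.bxor res (b.getD m 0) then PySem.Int.bxor res (b.getD m 0) else res := by
        by_cases hlt : res < PySem.Int.bxor res (b.getD m 0)
        · rw [max_eq_right (le_of_lt hlt), if_pos hlt]
        · rw [max_eq_left (not_lt.mp hlt), if_neg hlt]
      rw [hmax]
      by_cases hc : res < PySem.Int.bxor res (b.getD m 0)
      · rw [if_pos hc, if_pos ⟨h, hc⟩]
        exact ih (by omega) _
      · rw [if_neg hc, if_neg (by tauto)]
        exact ih (by omega) _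
    · rw [if_neg h]
      simp only [List.nil_append]
      rw [if_neg (by tauto)]
      exact ih (by omega) _

-- ===== VERDICT (by name: the statement is the Claim_ definition above) =====
theorem k_alternating_max_xor_spec : Claim_equal_k_alternating_max_xor := by
  intro nums k _ hk
  unfold Spec_k_alternating_max_xor
  rw [pvA_eq_basis nums k hk]
  unfold k_alternating_max_xor_alt
  simp only
  have hbasis : nums.reverse.foldl (fun b x => pvInsert b x) pvZeros = pvBasisOf nums := by
    rw [List.foldl_reverse]
    rfl
  have hrel : pvRel (nums.reverse.foldl (fun d x => pvInsB d x 32) PySem.Dict.empty)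
      (pvBasisOf nums) := by
    rw [← hbasis]
    exact pvFoldB_rel nums.reverse PySem.Dict.empty pvZeros pvRel_empty pvWF_zeros
  rw [pv_sorted_keys _ _ hrel, pv_fold_occ _ _ hrel 31 (le_refl 31) 0]
  rfl

theorem k_alternating_max_xor_raises : Claim_raises_k_alternating_max_xor := by
  unfold Claim_raises_k_alternating_max_xor
  constructor
  · intro nums k _ hr hp
    exact absurd hp (by unfold Pre_k_alternating_max_xor Raises_k_alternating_max_xor at *; omega)
  · refine ⟨by decide, by decide, by decide⟩

-- self-check: the recorded raise-witness value is exactly what B's port returns there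
theorem pvRaiseWitnessOut_ok :
    k_alternating_max_xor_alt pvRaiseWitness_k_alternating_max_xor.1
      pvRaiseWitness_k_alternating_max_xor.2 = pvRaiseWitnessOut_k_alternating_max_xor := by
  have h := k_alternating_max_xor_raises
  unfold Claim_raises_k_alternating_max_xor at h
  exact h.2.2.2
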